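-- pv_equiv track=rewrite | github.com/sharktankmol/CSprojects | ClassProjects/Python/abirhan2_225_PA7.py | swap_chars
-- ===== SOURCE A (Python) =====
-- def swap_chars(str1, str2, n, count=1): # default counter paremeter
--     if (len(str1)-(n*count))<0: #if we've reached the end of string 1
--         return (str1,str2) #exit with a tuple
--     list1 = list(str1) #make list holders to edit string 1 and 2
--     list2 = list(str2)
--     holder = list(str1)   #third list accounts for list1 alteration
--     list1[(n*count)-1] = list2[(n*count)-1] #exchange values, -1 for index
--     #*count determines which nth in list1 we put list2's element
--     list2[(n*count)-1] = holder[(n*count)-1]#third list represents list 1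
--     str1 = "".join(list1)#combine the edited lists with.join
--     str2 = "".join(list2)
--     count +=1 #increment in the case of a recursion
--     return swap_chars(str1,str2, n, count) #repeat
-- ===== SOURCE B (Python) =====
-- def swap_chars(str1, str2, n, count=1):
--     l1, l2 = list(str1), list(str2)
--     for i in range(n*count-1, len(str1), n):
--         l1[i], l2[i] = l2[i], l1[i]
--     return ("".join(l1), "".join(l2))
-- ===== Notes on version B (the rewrite author's own statement) =====
-- stated objective: simpler
-- what changed: replaces A's recursion, which rebuilds both full strings (list()/join) once per swapped character, with a single in-place pass over range(n*count-1, len(str1), n) swapping each nth character once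
-- outside the precondition, e.g. on swap_chars('ab', 'cd', -1, -5): A returns ('ab', 'cd'), B raises IndexError; on swap_chars('ab', 'cd', 1, 0): A returns ('cb', 'ad'), B returns ('cb', 'ad')
import Mathlib
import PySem

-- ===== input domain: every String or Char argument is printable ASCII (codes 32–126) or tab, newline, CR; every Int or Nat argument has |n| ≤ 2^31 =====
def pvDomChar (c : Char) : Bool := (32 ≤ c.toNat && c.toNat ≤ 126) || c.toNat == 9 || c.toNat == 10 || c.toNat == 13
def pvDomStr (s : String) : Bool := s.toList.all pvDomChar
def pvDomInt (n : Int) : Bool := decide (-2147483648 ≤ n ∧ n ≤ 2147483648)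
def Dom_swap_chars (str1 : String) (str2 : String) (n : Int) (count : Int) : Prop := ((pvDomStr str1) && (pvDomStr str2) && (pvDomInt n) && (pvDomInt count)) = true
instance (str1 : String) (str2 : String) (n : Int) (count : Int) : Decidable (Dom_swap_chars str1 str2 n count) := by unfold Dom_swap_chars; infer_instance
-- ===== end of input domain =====

-- B replaces A's recursion (which rebuilds both strings once per swap) with one linear
-- pass over range(n*count-1, len(str1), n); equivalence is proved on Pre_ below.

-- ===== PORT A =====
-- A's recursion, step for step, on the character lists; the extra `n ≤ 0` early return
-- is a totality guard only: for n ≤ 0 the Python either diverges (n = 0) or raises an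
-- IndexError unless it returns immediately via the first branch — all outside Pre_.
-- `pySetD`/`pyGetD` are the total forms of Python's index assignment/read; the default
-- is only reachable on IndexError inputs, which Pre_ excludes.
def pvSwapRec (l1 : List Char) (l2 : List Char) (n : Int) (count : Int) : List Char × List Char :=
  if (l1.length : Int) - n * count < 0 then (l1, l2)
  else if h : n ≤ 0 then (l1, l2)
  else
    let list1 := PySem.List.pySetD l1 (n * count - 1) (PySem.List.pyGetD l2 (n * count - 1) ' ')
    let list2 := PySem.List.pySetD l2 (n * count - 1) (PySem.List.pyGetD l1 (n * count - 1) ' ')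
    pvSwapRec list1 list2 n (count + 1)
termination_by ((l1.length : Int) - n * count + 1).toNat
decreasing_by
  simp only [PySem.List.length_pySetD]
  have : n * (count + 1) = n * count + n := by ring
  omega

def swap_chars (str1 : String) (str2 : String) (n : Int) (count : Int) : String × String :=
  let p := pvSwapRec str1.toList str2.toList n count
  (String.ofList p.1, String.ofList p.2)

-- ===== PORT B =====
-- Source B: l1, l2 = list(str1), list(str2); for i in range(n*count-1, len(str1), n): swap; join.
def swap_chars_alt (str1 : String) (str2 : String) (n : Int) (count : Int) : String × String :=
  let l1 := str1.toList
  let l2 := str2.toList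
  let p := (PySem.List.pyRange (n * count - 1) (l1.length : Int) n).foldl
    (fun (st : List Char × List Char) i =>
      (PySem.List.pySetD st.1 i (PySem.List.pyGetD st.2 i ' '),
       PySem.List.pySetD st.2 i (PySem.List.pyGetD st.1 i ' '))) (l1, l2)
  (String.ofList p.1, String.ofList p.2)

-- ===== PRECONDITION & SPEC =====
-- Pre_ excludes exactly the inputs on which A does not return an ordinary value plus two
-- accidental corners on which A still returns: n = 0 diverges; n ≥ 1 with a swap index
-- falling outside str2 raises IndexError; n < 0 either raises IndexError (the negative
-- index keeps growing) or, when n*count already exceeds len(str1), A's immediate return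
-- is an accident of the loop bound with a negative step; count ≤ 0 makes A's result
-- depend on Python's negative-index wraparound. See claim.json "cites" for examples.
def Pre_swap_chars (str1 : String) (str2 : String) (n : Int) (count : Int) : Prop :=
  1 ≤ n ∧ 1 ≤ count ∧
    (n * count ≤ (str1.toList.length : Int) →
      n * ((str1.toList.length : Int) / n) ≤ (str2.toList.length : Int))
instance (str1 : String) (str2 : String) (n : Int) (count : Int) : Decidable (Pre_swap_chars str1 str2 n count) := by unfold Pre_swap_chars; infer_instance

def pvWitness_swap_chars : String × String × Int × Int := ("abcd", "wxyz", 2, 1)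

def Spec_swap_chars (str1 : String) (str2 : String) (n : Int) (count : Int) (out : String × String) : Prop := out = swap_chars_alt str1 str2 n count
instance (str1 : String) (str2 : String) (n : Int) (count : Int) (out : String × String) : Decidable (Spec_swap_chars str1 str2 n count out) := by unfold Spec_swap_chars; infer_instance

-- ===== CLAIM (what is proved, stated in full; the proofs are below) =====
def Claim_equal_swap_chars : Prop := ∀ (str1 : String) (str2 : String) (n : Int) (count : Int), Dom_swap_chars str1 str2 n count → Pre_swap_chars str1 str2 n count → Spec_swap_chars str1 str2 n count (swap_chars str1 str2 n count)

-- ===== LEMMAS AND PROOFS =====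

-- range with a positive step is empty when start ≥ stop
theorem pvPyRange_pos_nil (a b s : Int) (hs : 0 < s) (hba : b ≤ a) :
    PySem.List.pyRange a b s = [] := by
  rw [PySem.List.pyRange_of_pos a b hs]
  have : ¬ a < b := not_lt.mpr hba
  simp [this]

-- range with a positive step peels its first element
theorem pvPyRange_pos_cons (a b s : Int) (hs : 0 < s) (hab : a < b) :
    PySem.List.pyRange a b s = a :: PySem.List.pyRange (a + s) b s := by
  rw [PySem.List.pyRange_of_pos a b hs, PySem.List.pyRange_of_pos (a + s) b hs]
  have hcount : (if a < b then ((b - a + s - 1) / s).toNat else 0)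
      = (if a + s < b then ((b - (a + s) + s - 1) / s).toNat else 0) + 1 := by
    simp only [if_pos hab]
    have key : (b - a + s - 1) / s = (b - a - 1) / s + 1 := by
      have : b - a + s - 1 = (b - a - 1) + 1 * s := by ring
      rw [this, Int.add_mul_ediv_right _ _ (ne_of_gt hs)]
    by_cases h2 : a + s < b
    · rw [if_pos h2]
      have hsz : b - a - 1 = b - (a + s) + s - 1 := by ring
      have hnn : 0 ≤ (b - a - 1) / s := Int.ediv_nonneg (by omega) (le_of_lt hs)
      rw [key, hsz.symm] ; omega
    · rw [if_neg h2]
      have hz : (b - a - 1) / s = 0 := Int.ediv_eq_zero_of_lt (by omega) (by omega)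
      rw [key, hz]; simp
  rw [hcount, List.range_succ_eq_map, List.map_cons, List.map_map]
  simp only [Nat.cast_zero, mul_zero, add_zero]
  congr 1
  apply List.map_congr_left
  intro k _
  simp only [Function.comp_apply]
  push_cast
  ring

-- A's recursion is B's left fold over range(n*count-1, len, n), for any lists and any count
theorem pvSwapRec_eq_foldl (n : Int) (hn : 0 < n) :
    ∀ (l1 l2 : List Char) (count : Int),
      pvSwapRec l1 l2 n count =
        (PySem.List.pyRange (n * count - 1) (l1.length : Int) n).foldl
          (fun (st : List Char × List Char) i =>
            (PySem.List.pySetD st.1 i (PySem.List.pyGetD st.2 i ' '),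
             PySem.List.pySetD st.2 i (PySem.List.pyGetD st.1 i ' '))) (l1, l2) := by
  intro l1 l2 count
  induction l1, l2, count using pvSwapRec.induct n with
  | case1 l1 l2 count hlt =>
      rw [pvSwapRec]
      rw [if_pos hlt, pvPyRange_pos_nil _ _ _ hn (by omega)]
      rfl
  | case2 l1 l2 count hge hle =>
      exact absurd hn (by omega)
  | case3 l1 l2 count hge hpos list1 list2 ih =>
      rw [pvSwapRec, if_neg hge, dif_neg hpos]
      have hab : n * count - 1 < (l1.length : Int) := by omega
      rw [pvPyRange_pos_cons _ _ _ hn hab, List.foldl_cons]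
      have harg : n * count - 1 + n = n * (count + 1) - 1 := by ring
      have hlen : (PySem.List.pySetD l1 (n * count - 1)
          (PySem.List.pyGetD l2 (n * count - 1) ' ')).length = l1.length :=
        PySem.List.length_pySetD _ _ _
      rw [harg]
      simpa [list1, list2, hlen] using ih

-- ===== VERDICT (by name: the statement is the Claim_ definition above) =====
theorem swap_chars_spec : Claim_equal_swap_chars := by
  intro str1 str2 n count _ hpre
  obtain ⟨hn, -, -⟩ := hpre
  show swap_chars str1 str2 n count = swap_chars_alt str1 str2 n count
  unfold swap_chars swap_chars_alt
  rw [pvSwapRec_eq_foldl n (by omega)]
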